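-- pv_equiv track=rewrite | github.com/zordsdavini/LLH | llh_date.py | _is_ousis
-- ===== SOURCE A (Python) =====
-- def _is_ousis(year_number):
--     """Sotikrintė a metā tor ůsė mienesi
--
--     :year_number: int
--     :returns: bool
--
--     """
--     tskl = [
--         (2, 7, False, 0),    # 3/4
--         (6, 7, False, 0),      # 3/4 arba 3/4-4/3
--         (1, 8, True, 345),      # kas 8, 345 nȧsisded
--     ]
--     sk = [0, 0, 0]
--
--     ousis = False
--     for k, t in enumerate(tskl):
--         if year_number % int(t[1]) == int(t[0]) or int(t[0]) == int(t[1]) and year_number % int(t[0]) == 0: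
--             # Sotikrintė a nȧrēk nȧpridietė
--             # if (t[2]):
--             #     sk[k] += 1
--             #     if sk[k] >= t[3]:
--             #         sk[k] = 0
--             #         break
--
--             ousis = True
--
--     return ousis
-- ===== SOURCE B (Python) =====
-- # Periodic lookup: the rule is periodic with period lcm(7, 8) = 56, so reduce the
-- # year mod 56 and look the residue up in a precomputed frozen table.
-- _OUSIS_RESIDUES = frozenset({
--     1, 2, 6, 9, 13, 16, 17, 20, 23, 25, 27, 30, 33,
--     34, 37, 41, 44, 48, 49, 51, 55,
-- })
--
--
-- def _is_ousis(year_number):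
--     """Sotikrintė a metā tor ůsė mienesi (periodic-table lookup)"""
--     return year_number % 56 in _OUSIS_RESIDUES
-- ===== Notes on version B (the rewrite author's own statement) =====
-- stated objective: alternative
-- what changed: Exploits that the rule is periodic with period lcm(7,8)=56: B reduces the year mod 56 once and looks the residue up in a precomputed frozenset of the 21 qualifying residues, instead of A's data-driven loop over a tuple table of per-row modular tests.
import Mathlib
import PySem

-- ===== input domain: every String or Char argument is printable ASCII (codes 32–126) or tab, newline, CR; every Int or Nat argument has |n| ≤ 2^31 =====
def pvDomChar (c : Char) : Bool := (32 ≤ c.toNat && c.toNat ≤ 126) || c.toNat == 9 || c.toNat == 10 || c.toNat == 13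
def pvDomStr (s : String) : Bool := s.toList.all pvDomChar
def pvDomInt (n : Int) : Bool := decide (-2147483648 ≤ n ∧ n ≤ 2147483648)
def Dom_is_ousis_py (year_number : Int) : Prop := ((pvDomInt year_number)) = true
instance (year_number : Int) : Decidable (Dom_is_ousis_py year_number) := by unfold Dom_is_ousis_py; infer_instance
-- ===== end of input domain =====

-- B replaces A's tuple-table loop by a single reduction mod 56 (= lcm 7 8) and a
-- membership test in a precomputed table of the 21 qualifying residues (objective: alternative).


-- ===== PORT A =====
-- Literal port of A: the tuple table, the unused counter list, and the fold over
-- enumerate(tskl) updating the `ousis` flag.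
def is_ousis_py (year_number : Int) : Bool :=
  let tskl : List (Int × Int × Bool × Int) := [(2, 7, false, 0), (6, 7, false, 0), (1, 8, true, 345)]
  let _sk : List Int := [0, 0, 0]
  let ousis := false
  (PySem.List.enumerate tskl).foldl
    (fun ousis kt =>
      let t := kt.2
      if PySem.Int.mod year_number t.2.1 == t.1 || (t.1 == t.2.1 && PySem.Int.mod year_number t.1 == 0) then
        true
      else
        ousis)
    ousis

-- ===== PORT B =====
-- Port of B: the precomputed residue table (frozenset of distinct small Ints → PySem.Set)
-- and one membership test after reducing the year mod 56.
def ousisResidues : PySem.Set Int :=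
  PySem.Set.ofList [1, 2, 6, 9, 13, 16, 17, 20, 23, 25, 27, 30, 33, 34, 37, 41, 44, 48, 49, 51, 55]

def is_ousis_py_alt (year_number : Int) : Bool :=
  PySem.Set.contains ousisResidues (PySem.Int.mod year_number 56)

-- ===== PRECONDITION & SPEC =====
def Spec_is_ousis_py (year_number : Int) (out : Bool) : Prop := out = is_ousis_py_alt year_number
instance (year_number : Int) (out : Bool) : Decidable (Spec_is_ousis_py year_number out) := by unfold Spec_is_ousis_py; infer_instance

-- ===== CLAIM =====
def Claim_equal_is_ousis_py : Prop := ∀ (year_number : Int), Dom_is_ousis_py year_number → Spec_is_ousis_py year_number (is_ousis_py year_number)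

-- ===== LEMMAS AND PROOFS =====
-- Both programs depend on y only through y % 56 (56 = lcm 7 8): A's row tests read
-- y % 7 and y % 8, which equal (y % 56) % 7 and (y % 56) % 8; for each of the 56
-- residues the two sides are checked by decide.
theorem is_ousis_py_spec : Claim_equal_is_ousis_py := by
  intro y _
  unfold Spec_is_ousis_py
  have h7 : y % 7 = (y % 56) % 7 := (Int.emod_emod_of_dvd y (by norm_num : (7:Int) ∣ 56)).symm
  have h8 : y % 8 = (y % 56) % 8 := (Int.emod_emod_of_dvd y (by norm_num : (8:Int) ∣ 56)).symm
  simp [is_ousis_py, is_ousis_py_alt, ousisResidues, PySem.List.enumerate,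
        PySem.Set.contains, PySem.Set.ofList]
  rw [h7, h8]
  have hlo : 0 ≤ y % 56 := Int.emod_nonneg y (by norm_num)
  have hhi : y % 56 < 56 := Int.emod_lt_of_pos y (by norm_num)
  generalize y % 56 = r at hlo hhi ⊢
  interval_cases r <;> decide
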